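-- pv_equiv track=rewrite | github.com/bcheny/Vortex | model/utils.py | get_encoded_clusters
-- ===== SOURCE A (Python) =====
-- def get_encoded_clusters(list, offset=0):
--     cluster_dict = {}
--     encoded_clusters = []
--     for cluster in list:
--         if cluster not in cluster_dict:
--             cluster_dict[cluster] = len(cluster_dict) + offset
--         encoded_clusters.append(cluster_dict[cluster])
--     return encoded_clusters, cluster_dict
-- ===== SOURCE B (Python) =====
-- def get_encoded_clusters(list, offset=0):
--     # Counting formulation: a label's code is the number of distinct labels
--     # appearing strictly before its first occurrence, plus the offset; no
--     # incremental code table is built.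
--     items = [x for x in list]
--
--     def code(c):
--         return offset + len(set(items[:items.index(c)]))
--
--     encoded_clusters = [code(x) for x in items]
--     cluster_dict = {c: code(c) for i, c in enumerate(items) if c not in items[:i]}
--     return encoded_clusters, cluster_dict
-- ===== Notes on version B (the rewrite author's own statement) =====
-- stated objective: alternative
-- what changed: Replaced A's incremental code table (insert-on-first-sight while emitting codes) by a direct counting formulation: each label's code is computed independently as offset + the number of distinct labels before its first occurrence, and the dict is a comprehension over the first occurrences; no table is threaded through a loop.
import Mathlib
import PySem

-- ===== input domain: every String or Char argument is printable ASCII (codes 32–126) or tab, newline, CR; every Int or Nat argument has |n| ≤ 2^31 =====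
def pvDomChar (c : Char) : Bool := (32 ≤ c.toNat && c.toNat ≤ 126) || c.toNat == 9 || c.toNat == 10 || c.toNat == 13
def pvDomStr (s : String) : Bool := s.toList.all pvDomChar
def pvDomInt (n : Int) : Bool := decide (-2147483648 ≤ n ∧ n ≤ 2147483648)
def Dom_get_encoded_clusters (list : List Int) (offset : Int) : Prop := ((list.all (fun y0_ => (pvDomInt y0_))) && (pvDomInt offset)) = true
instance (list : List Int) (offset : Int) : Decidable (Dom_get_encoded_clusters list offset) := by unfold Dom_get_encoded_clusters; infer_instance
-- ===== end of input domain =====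

-- B replaces A's incremental code table by a counting formulation: a label's code is
-- offset + the number of distinct labels before its first occurrence; neither version
-- mutates its arguments.

-- ===== PORT A =====
-- A: one loop; for each cluster, insert len(dict)+offset if unseen, then append dict[cluster].
def get_encoded_clusters (list : List Int) (offset : Int) : List Int × (List (Int × Int)) :=
  let st := list.foldl
    (fun (st : PySem.Dict Int Int × List Int) cluster =>
      let d := if st.1.contains cluster = false
               then st.1.insert cluster ((st.1.size : Int) + offset)
               else st.1
      (d, st.2 ++ [d.getD cluster 0]))   -- cluster_dict[cluster]: the key is always present here
    (PySem.Dict.empty, [])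
  (st.2, st.1.items)

-- ===== PORT B =====
-- B's helper code(c) = offset + len(set(items[:items.index(c)])); only applied to c ∈ items,
-- where items.index never raises (the .getD 0 is never reached on a member).
def gec_code (items : List Int) (offset : Int) (c : Int) : Int :=
  let j : Nat := (PySem.List.index? items c).getD 0
  offset + ((PySem.Set.ofList (items.take j)).length : Int)   -- items[:j] = items.take j (j a Nat)

-- B: items = [x for x in list]; codes by counting; dict comprehension over first occurrences.
def get_encoded_clusters_alt (list : List Int) (offset : Int) : List Int × (List (Int × Int)) :=
  let items := list.map (fun x => x)
  let encoded := items.map (fun x => gec_code items offset x)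
  let cluster_dict : PySem.Dict Int Int := PySem.Dict.ofList
    (((PySem.List.enumerate items 0).filter
        (fun p => !((PySem.List.slice items none (some p.1)).contains p.2))).map
      (fun p => (p.2, gec_code items offset p.2)))
  (encoded, cluster_dict.items)

-- ===== PRECONDITION & SPEC =====
def Spec_get_encoded_clusters (list : List Int) (offset : Int) (out : List Int × (List (Int × Int))) : Prop := out = get_encoded_clusters_alt list offset
instance (list : List Int) (offset : Int) (out : List Int × (List (Int × Int))) : Decidable (Spec_get_encoded_clusters list offset out) := by unfold Spec_get_encoded_clusters; infer_instance

-- ===== CLAIM (what is proved, stated in full; the proofs are below) =====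
def Claim_equal_get_encoded_clusters : Prop := ∀ (list : List Int) (offset : Int), Dom_get_encoded_clusters list offset → Spec_get_encoded_clusters list offset (get_encoded_clusters list offset)

-- ===== LEMMAS AND PROOFS =====

-- The code table A builds for an (already deduplicated) key list u: k-th key ↦ k + offset.
def encDict (offset : Int) (u : List Int) : PySem.Dict Int Int :=
  PySem.Dict.mk ((PySem.List.enumerate u 0).map (fun p => (p.2, p.1 + offset)))

theorem dict_eq_of_items {κ ν : Type} (d1 d2 : PySem.Dict κ ν) (h : d1.items = d2.items) : d1 = d2 := by
  cases d1; cases d2; simpa using h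

theorem keys_encDict (offset : Int) (u : List Int) : (encDict offset u).keys = u := by
  simp [encDict, PySem.Dict.keys, List.map_map, Function.comp_def]

theorem contains_encDict (offset : Int) (u : List Int) (c : Int) :
    (encDict offset u).contains c = decide (c ∈ u) := by
  cases hc : (encDict offset u).contains c with
  | true =>
    have hm : c ∈ u := by
      have := (PySem.Dict.contains_iff_mem_keys (encDict offset u) c).1 hc
      rwa [keys_encDict] at this
    simp [hm]
  | false =>
    have hm : c ∉ u := fun h => by
      have : (encDict offset u).contains c = true :=
        (PySem.Dict.contains_iff_mem_keys (encDict offset u) c).2 (by rwa [keys_encDict])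
      simp [hc] at this
    simp [hm]

theorem insert_encDict (offset : Int) (u : List Int) (c : Int) (h : c ∉ u) :
    (encDict offset u).insert c (((encDict offset u).size : Int) + offset)
      = encDict offset (u ++ [c]) := by
  have hc : (encDict offset u).contains c = false := by
    rw [contains_encDict]; simpa using h
  apply dict_eq_of_items
  rw [PySem.Dict.items_insert_of_not_contains (encDict offset u) _ hc]
  simp [encDict, PySem.List.enumerate_append, PySem.List.enumerate_cons,
    PySem.List.enumerate_nil, PySem.Dict.size, PySem.List.length_enumerate]

theorem getD_encDict_mem (offset : Int) (u : List Int) (c : Int) (hn : u.Nodup)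
    (k : Nat) (hk : k < u.length) (hget : u[k] = c) :
    (encDict offset u).getD c 0 = (k : Int) + offset := by
  apply PySem.Dict.getD_of_mem_items
  · simp only [encDict, List.mem_map]
    exact ⟨((k : Int), c), by rw [PySem.List.mem_enumerate_iff]; exact ⟨k, hk, by simp [hget]⟩, rfl⟩
  · rw [keys_encDict]; exact hn

-- Looked-up codes are stable under extending the key list on the right.
theorem getD_encDict_append (offset : Int) (u v : List Int) (c : Int)
    (hn : (u ++ v).Nodup) (hc : c ∈ u) :
    (encDict offset (u ++ v)).getD c 0 = (encDict offset u).getD c 0 := by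
  obtain ⟨k, hk, hget⟩ := List.getElem_of_mem hc
  rw [getD_encDict_mem offset u c (hn.sublist (List.sublist_append_left u v)) k hk hget,
      getD_encDict_mem offset (u ++ v) c hn k (by simp; omega)
        (by rw [List.getElem_append_left hk]; exact hget)]

theorem exists_update_append (l : List Int) : ∀ (u : List Int), ∃ v, PySem.Set.update u l = u ++ v := by
  induction l with
  | nil => exact fun u => ⟨[], by simp [PySem.Set.update]⟩
  | cons c l ih =>
    intro u
    have hstep : PySem.Set.update u (c :: l) = PySem.Set.update (PySem.Set.add u c) l := rfl
    obtain ⟨v, hv⟩ := ih (PySem.Set.add u c)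
    by_cases h : PySem.Set.contains u c = true
    · exact ⟨v, by rw [hstep, hv, PySem.Set.add, if_pos h]⟩
    · exact ⟨c :: v, by rw [hstep, hv, PySem.Set.add, if_neg h]; simp⟩

theorem getD_encDict_update (offset : Int) (l u : List Int) (c : Int)
    (hn : (PySem.Set.update u l).Nodup) (hc : c ∈ u) :
    (encDict offset (PySem.Set.update u l)).getD c 0 = (encDict offset u).getD c 0 := by
  obtain ⟨v, hv⟩ := exists_update_append l u
  rw [hv] at hn ⊢
  exact getD_encDict_append offset u v c hn hc

-- The invariant of A's loop: starting from the table for a deduplicated prefix u,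
-- the loop extends the table by l's new keys and appends l's codes.
theorem loopA (offset : Int) : ∀ (l u enc : List Int), u.Nodup →
    l.foldl
      (fun (st : PySem.Dict Int Int × List Int) cluster =>
        let d := if st.1.contains cluster = false
                 then st.1.insert cluster ((st.1.size : Int) + offset)
                 else st.1
        (d, st.2 ++ [d.getD cluster 0]))
      (encDict offset u, enc)
    = (encDict offset (PySem.Set.update u l),
       enc ++ l.map (fun c => (encDict offset (PySem.Set.update u l)).getD c 0)) := by
  intro l
  induction l with
  | nil => intro u enc _; simp [PySem.Set.update]
  | cons c l ih =>
    intro u enc hn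
    have hupd : PySem.Set.update u (c :: l) = PySem.Set.update (PySem.Set.add u c) l := rfl
    by_cases h : c ∈ u
    · have hcontains : (encDict offset u).contains c = true := by
        rw [contains_encDict]; simpa using h
      have hadd : PySem.Set.add u c = u := by
        rw [PySem.Set.add, if_pos]; simpa [PySem.Set.contains, List.contains_iff_mem] using h
      have hnup : (PySem.Set.update u l).Nodup := PySem.Set.nodup_update u l hn
      simp only [List.foldl_cons, hcontains, Bool.true_eq_false, if_false]
      rw [ih u (enc ++ [(encDict offset u).getD c 0]) hn]
      rw [hupd, hadd]
      simp [getD_encDict_update offset l u c hnup h]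
    · have hcontains : (encDict offset u).contains c = false := by
        rw [contains_encDict]; simpa using h
      have hadd : PySem.Set.add u c = u ++ [c] := by
        rw [PySem.Set.add, if_neg]; simpa [PySem.Set.contains, List.contains_iff_mem] using h
      have hn' : (u ++ [c]).Nodup := by
        rw [List.nodup_append]
        refine ⟨hn, List.nodup_singleton c, ?_⟩
        intro a ha b hb
        simp only [List.mem_singleton] at hb
        exact fun e => h ((e.trans hb) ▸ ha)
      have hnup : (PySem.Set.update (u ++ [c]) l).Nodup := PySem.Set.nodup_update _ l hn'
      simp only [List.foldl_cons, hcontains, if_true]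
      rw [insert_encDict offset u c h]
      rw [ih (u ++ [c]) (enc ++ [(encDict offset (u ++ [c])).getD c 0]) hn']
      rw [hupd, hadd]
      simp [getD_encDict_update offset l (u ++ [c]) c hnup (by simp)]

-- The rank of the k-th distinct label: B's counting code gives offset + k.
theorem rank_gec (offset : Int) (items : List Int) (k : Nat)
    (hk : k < (PySem.List.dedup items).length) :
    gec_code items offset ((PySem.List.dedup items)[k]) = offset + (k : Int) := by
  set c := (PySem.List.dedup items)[k] with hcdef
  have hmem : c ∈ items := by
    have := List.getElem_mem hk
    rwa [PySem.List.mem_dedup] at this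
  obtain ⟨j, hj⟩ : ∃ j, PySem.List.index? items c = some j :=
    Option.isSome_iff_exists.1 ((PySem.List.index?_isSome_iff items c).2 hmem)
  obtain ⟨pre, suf, hitems, hlen, hpre⟩ := (PySem.List.index?_eq_some_iff items c j).1 hj
  have htake : items.take j = pre := by rw [hitems, ← hlen]; exact List.take_left
  have haddc : PySem.Set.add (PySem.Set.ofList pre) c = PySem.Set.ofList pre ++ [c] := by
    rw [PySem.Set.add, if_neg]
    simp only [PySem.Set.contains_eq_listContains]
    simpa [List.contains_iff_mem, PySem.Set.mem_ofList] using hpre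
  obtain ⟨w, hw⟩ := exists_update_append suf (PySem.Set.ofList pre ++ [c])
  have hded : PySem.List.dedup items = PySem.Set.ofList pre ++ c :: w := by
    rw [hitems, PySem.List.dedup_eq_ofList, PySem.Set.ofList_append, PySem.Set.update_cons,
      haddc, hw]
    simp
  have hn : (PySem.List.dedup items).Nodup := PySem.List.nodup_dedup items
  have hlt : (PySem.Set.ofList pre).length < (PySem.List.dedup items).length := by
    rw [hded]; simp
  have hgetp : (PySem.List.dedup items)[(PySem.Set.ofList pre).length]'hlt = c := by
    simp only [hded]
    simp
  have hkeq : k = (PySem.Set.ofList pre).length :=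
    (List.Nodup.getElem_inj_iff hn).1 (by rw [hgetp, ← hcdef])
  simp only [gec_code, hj, Option.getD_some, htake]
  rw [← hkeq]

-- B's counting code agrees with A's table on every member of items.
theorem gec_eq_getD (offset : Int) (items : List Int) (c : Int) (hc : c ∈ items) :
    gec_code items offset c = (encDict offset (PySem.List.dedup items)).getD c 0 := by
  have hcd : c ∈ PySem.List.dedup items := (PySem.List.mem_dedup items c).2 hc
  obtain ⟨k, hk, hget⟩ := List.getElem_of_mem hcd
  rw [← hget, rank_gec offset items k hk,
      getD_encDict_mem offset _ _ (PySem.List.nodup_dedup items) k hk rfl]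
  ring

-- The filter over enumerate keeps exactly the first occurrences, in order: generalised form.
theorem firstocc_aux (suf : List Int) : ∀ (pre : List Int),
    PySem.Set.ofList pre ++
      (((PySem.List.enumerate suf ((pre.length : Nat) : Int)).filter
        (fun p => !((PySem.List.slice (pre ++ suf) none (some p.1)).contains p.2))).map (·.2))
    = PySem.Set.ofList (pre ++ suf) := by
  induction suf with
  | nil => intro pre; simp
  | cons x suf ih =>
    intro pre
    have hstart : ((pre.length : Nat) : Int) + 1 = (((pre ++ [x]).length : Nat) : Int) := by
      simp
    have hassoc : pre ++ x :: suf = (pre ++ [x]) ++ suf := by simp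
    have hslice : PySem.List.slice (pre ++ x :: suf) none (some ((pre.length : Nat) : Int)) = pre := by
      rw [PySem.List.slice_to_natCast]
      exact List.take_left
    have hih := ih (pre ++ [x])
    rw [← hassoc] at hih
    rw [← hstart] at hih
    rw [PySem.List.enumerate_cons, List.filter_cons]
    by_cases h : x ∈ pre
    · have hcond : (!((PySem.List.slice (pre ++ x :: suf) none (some ((pre.length : Nat) : Int))).contains x)) = false := by
        rw [hslice]; simp [h]
      simp only [hcond, Bool.false_eq_true, if_false]
      have : PySem.Set.ofList (pre ++ [x]) = PySem.Set.ofList pre := by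
        rw [PySem.Set.ofList_append_singleton, PySem.Set.add, if_pos]
        simp [PySem.Set.mem_ofList, h]
      rw [this] at hih
      exact hih
    · have hcond : (!((PySem.List.slice (pre ++ x :: suf) none (some ((pre.length : Nat) : Int))).contains x)) = true := by
        rw [hslice]; simp [h]
      simp only [hcond, if_pos, List.map_cons]
      have : PySem.Set.ofList (pre ++ [x]) = PySem.Set.ofList pre ++ [x] := by
        rw [PySem.Set.ofList_append_singleton, PySem.Set.add, if_neg]
        simp [PySem.Set.mem_ofList, h]
      rw [this] at hih
      simpa using hih

-- The filtered first occurrences, as a list, are exactly the ordered distinct labels.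
theorem firstocc_eq_dedup (items : List Int) :
    (((PySem.List.enumerate items 0).filter
        (fun p => !((PySem.List.slice items none (some p.1)).contains p.2))).map (·.2))
      = PySem.List.dedup items := by
  simpa using firstocc_aux items []

-- B's dict-comprehension pair list IS A's table, item for item.
theorem pairs_eq_encDict (offset : Int) (list : List Int) :
    (((PySem.List.enumerate list 0).filter
        (fun p => !((PySem.List.slice list none (some p.1)).contains p.2))).map
      (fun p => (p.2, gec_code list offset p.2)))
    = (PySem.List.enumerate (PySem.List.dedup list) 0).map (fun p => (p.2, p.1 + offset)) := by
  have h1 : (((PySem.List.enumerate list 0).filter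
        (fun p => !((PySem.List.slice list none (some p.1)).contains p.2))).map
      (fun p => (p.2, gec_code list offset p.2)))
      = ((((PySem.List.enumerate list 0).filter
        (fun p => !((PySem.List.slice list none (some p.1)).contains p.2))).map (·.2)).map
      (fun c => (c, gec_code list offset c))) := by
    rw [List.map_map]; rfl
  rw [h1, firstocc_eq_dedup]
  apply List.ext_getElem
  · simp [PySem.List.length_enumerate]
  · intro k h1 h2
    have hk : k < (PySem.List.dedup list).length := by simpa using h1
    simp only [List.getElem_map, PySem.List.getElem_enumerate]
    rw [rank_gec offset list k hk]
    simp [add_comm]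

-- ===== VERDICT (by name: the statement is the Claim_ definition above) =====
theorem get_encoded_clusters_spec : Claim_equal_get_encoded_clusters := by
  intro list offset _
  simp only [Spec_get_encoded_clusters, get_encoded_clusters, get_encoded_clusters_alt,
    List.map_id']
  have h0 : (PySem.Dict.empty : PySem.Dict Int Int) = encDict offset [] := by
    simp [encDict, PySem.Dict.empty, PySem.List.enumerate_nil]
  rw [h0, loopA offset list [] [] List.nodup_nil]
  have hded : PySem.Set.update ([] : List Int) list = PySem.List.dedup list := by
    rw [PySem.List.dedup_eq_ofList]; rfl
  rw [hded]
  have hfresh := PySem.Dict.items_foldl_insert_fresh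
    ((PySem.List.enumerate (PySem.List.dedup list) 0).map (fun p => (p.2, p.1 + offset)))
    (fun p => p.1) (fun p => p.2) (PySem.Dict.empty (κ := Int) (ν := Int))
    (fun a _ => PySem.Dict.contains_empty a.1)
    (by
      simp only [List.map_map, Function.comp_def]
      simp)
  have hdict : (PySem.Dict.ofList (((PySem.List.enumerate list 0).filter
        (fun p => !((PySem.List.slice list none (some p.1)).contains p.2))).map
      (fun p => (p.2, gec_code list offset p.2)))).items
      = (encDict offset (PySem.List.dedup list)).items := by
    rw [pairs_eq_encDict offset list, PySem.Dict.ofList, PySem.Dict.update]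
    simpa [encDict] using hfresh
  simp only [Prod.mk.injEq]
  refine ⟨?_, hdict.symm⟩
  rw [List.nil_append]
  exact List.map_congr_left (fun c hc => (gec_eq_getD offset list c hc).symm)
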